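-- pv_equiv track=rewrite | github.com/nicholas-a11y/centerline-tracing-web-app | test_ui_backend.py | _fixture_pass_fail_from_results
-- ===== SOURCE A (Python) =====
-- def _fixture_pass_fail_from_results(
--     fixture_ids: list[str], node_results: dict[str, str]
-- ) -> dict[str, str]:
--     """Derive per-fixture pass/fail from pytest node results."""
--     results: dict[str, str] = {}
--     for fid in fixture_ids:
--         statuses = [st for node_id, st in node_results.items() if f"[{fid}]" in node_id]
--         if not statuses:
--             results[fid] = "unknown"
--         elif "failed" in statuses:
--             results[fid] = "failed"
--         else:
--             results[fid] = "passed"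
--     return results
-- ===== SOURCE B (Python) =====
-- def _fixture_pass_fail_from_results(
--     fixture_ids: list[str], node_results: dict[str, str]
-- ) -> dict[str, str]:
--     """Derive per-fixture pass/fail from pytest node results."""
--     seen: set[str] = set()
--     failed: set[str] = set()
--     for node_id, st in node_results.items():
--         for fid in fixture_ids:
--             if f"[{fid}]" in node_id:
--                 seen.add(fid)
--                 if st == "failed":
--                     failed.add(fid)
--     return {
--         fid: "failed" if fid in failed else ("passed" if fid in seen else "unknown")
--         for fid in fixture_ids
--     }
-- ===== Notes on version B (the rewrite author's own statement) =====
-- stated objective: alternative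
-- what changed: Replaces per-fixture re-scans of node_results (building a statuses list per fixture) with one streaming pass over node_results that aggregates 'seen' and 'failed' sets, followed by a single comprehension over fixture_ids.
import Mathlib
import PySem

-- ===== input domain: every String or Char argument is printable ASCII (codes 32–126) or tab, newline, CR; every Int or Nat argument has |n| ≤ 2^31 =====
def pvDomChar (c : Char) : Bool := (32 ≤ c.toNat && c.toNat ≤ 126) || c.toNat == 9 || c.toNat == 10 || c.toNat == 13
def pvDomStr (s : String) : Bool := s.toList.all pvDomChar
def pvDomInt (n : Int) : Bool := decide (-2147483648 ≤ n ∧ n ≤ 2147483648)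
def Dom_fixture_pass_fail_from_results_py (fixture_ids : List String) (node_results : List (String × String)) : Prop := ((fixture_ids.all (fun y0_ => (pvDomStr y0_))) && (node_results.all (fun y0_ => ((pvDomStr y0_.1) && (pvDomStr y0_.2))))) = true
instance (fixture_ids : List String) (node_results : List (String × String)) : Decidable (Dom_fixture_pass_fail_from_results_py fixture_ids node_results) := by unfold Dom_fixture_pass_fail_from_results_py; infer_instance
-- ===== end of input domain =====

-- B replaces A's per-fixture re-scan of node_results with one streaming pass
-- aggregating 'seen'/'failed' sets (alternative decomposition, same return value).

-- ===== PORT A =====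
-- per fid: statuses = [st for node_id, st in node_results.items() if f"[{fid}]" in node_id]; then classify
def fixture_pass_fail_from_results_py (fixture_ids : List String) (node_results : List (String × String)) : List (String × String) :=
  (fixture_ids.foldl (fun (results : PySem.Dict String String) fid =>
    let statuses := (node_results.filter (fun pr => PySem.Str.isIn ("[" ++ fid ++ "]") pr.1)).map Prod.snd
    if statuses.isEmpty then PySem.Dict.insert results fid "unknown"
    else if statuses.contains "failed" then PySem.Dict.insert results fid "failed"
    else PySem.Dict.insert results fid "passed") PySem.Dict.empty).items

-- ===== PORT B =====
-- one pass over node_results building (seen, failed) sets, then one dict comprehension over fixture_ids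
def fixture_pass_fail_from_results_py_alt (fixture_ids : List String) (node_results : List (String × String)) : List (String × String) :=
  let sets : PySem.Set String × PySem.Set String :=
    node_results.foldl (fun acc pr =>
      fixture_ids.foldl (fun acc2 fid =>
        if PySem.Str.isIn ("[" ++ fid ++ "]") pr.1 then
          (PySem.Set.add acc2.1 fid,
           if pr.2 == "failed" then PySem.Set.add acc2.2 fid else acc2.2)
        else acc2) acc) (PySem.Set.empty, PySem.Set.empty)
  (fixture_ids.foldl (fun (results : PySem.Dict String String) fid =>
    PySem.Dict.insert results fid
      (if PySem.Set.contains sets.2 fid then "failed"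
       else if PySem.Set.contains sets.1 fid then "passed" else "unknown")) PySem.Dict.empty).items

-- ===== PRECONDITION & SPEC =====
def Spec_fixture_pass_fail_from_results_py (fixture_ids : List String) (node_results : List (String × String)) (out : List (String × String)) : Prop := out = fixture_pass_fail_from_results_py_alt fixture_ids node_results
instance (fixture_ids : List String) (node_results : List (String × String)) (out : List (String × String)) : Decidable (Spec_fixture_pass_fail_from_results_py fixture_ids node_results out) := by unfold Spec_fixture_pass_fail_from_results_py; infer_instance

-- ===== CLAIM (what is proved, stated in full; the proofs are below) =====
def Claim_equal_fixture_pass_fail_from_results_py : Prop := ∀ (fixture_ids : List String) (node_results : List (String × String)), Dom_fixture_pass_fail_from_results_py fixture_ids node_results → Spec_fixture_pass_fail_from_results_py fixture_ids node_results (fixture_pass_fail_from_results_py fixture_ids node_results)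

-- ===== LEMMAS AND PROOFS =====

-- membership in the two sets after B's inner pass over fixture_ids (one node pr)
theorem pv_inner_mem (l : List String) (pr : String × String) (acc : PySem.Set String × PySem.Set String) (fid : String) :
    (fid ∈ (l.foldl (fun acc2 f =>
        if PySem.Str.isIn ("[" ++ f ++ "]") pr.1 then
          (PySem.Set.add acc2.1 f,
           if pr.2 == "failed" then PySem.Set.add acc2.2 f else acc2.2)
        else acc2) acc).1
      ↔ fid ∈ acc.1 ∨ (fid ∈ l ∧ PySem.Str.isIn ("[" ++ fid ++ "]") pr.1 = true)) ∧
    (fid ∈ (l.foldl (fun acc2 f =>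
        if PySem.Str.isIn ("[" ++ f ++ "]") pr.1 then
          (PySem.Set.add acc2.1 f,
           if pr.2 == "failed" then PySem.Set.add acc2.2 f else acc2.2)
        else acc2) acc).2
      ↔ fid ∈ acc.2 ∨ (fid ∈ l ∧ PySem.Str.isIn ("[" ++ fid ++ "]") pr.1 = true ∧ pr.2 = "failed")) := by
  induction l generalizing acc with
  | nil => simp
  | cons x xs ih =>
    simp only [List.foldl_cons]
    refine ⟨((ih _).1).trans ?_, ((ih _).2).trans ?_⟩
    · by_cases hx : PySem.Str.isIn ("[" ++ x ++ "]") pr.1 = true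
      · rw [if_pos hx]
        simp only [List.mem_cons, PySem.Set.mem_add]
        constructor
        · rintro (⟨h | rfl⟩ | ⟨h1, h2⟩)
          · exact Or.inl h
          · exact Or.inr ⟨Or.inl rfl, hx⟩
          · exact Or.inr ⟨Or.inr h1, h2⟩
        · rintro (h | ⟨(rfl | h1), h2⟩)
          · exact Or.inl (Or.inl h)
          · exact Or.inl (Or.inr rfl)
          · exact Or.inr ⟨h1, h2⟩
      · rw [if_neg hx]
        simp only [List.mem_cons]
        constructor
        · rintro (h | ⟨h1, h2⟩)
          · exact Or.inl h
          · exact Or.inr ⟨Or.inr h1, h2⟩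
        · rintro (h | ⟨(rfl | h1), h2⟩)
          · exact Or.inl h
          · exact absurd h2 hx
          · exact Or.inr ⟨h1, h2⟩
    · by_cases hx : PySem.Str.isIn ("[" ++ x ++ "]") pr.1 = true
      · rw [if_pos hx]
        by_cases hf : (pr.2 == "failed") = true
        · rw [if_pos hf]
          have hf' : pr.2 = "failed" := by simpa using hf
          simp only [List.mem_cons, PySem.Set.mem_add]
          constructor
          · rintro (⟨h | rfl⟩ | ⟨h1, h2, h3⟩)
            · exact Or.inl h
            · exact Or.inr ⟨Or.inl rfl, hx, hf'⟩
            · exact Or.inr ⟨Or.inr h1, h2, h3⟩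
          · rintro (h | ⟨(rfl | h1), h2, h3⟩)
            · exact Or.inl (Or.inl h)
            · exact Or.inl (Or.inr rfl)
            · exact Or.inr ⟨h1, h2, h3⟩
        · rw [if_neg hf]
          have hf' : ¬ pr.2 = "failed" := by simpa using hf
          simp only [List.mem_cons]
          constructor
          · rintro (h | ⟨h1, h2, h3⟩)
            · exact Or.inl h
            · exact Or.inr ⟨Or.inr h1, h2, h3⟩
          · rintro (h | ⟨(rfl | h1), h2, h3⟩)
            · exact Or.inl h
            · exact absurd h3 hf'
            · exact Or.inr ⟨h1, h2, h3⟩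
      · rw [if_neg hx]
        simp only [List.mem_cons]
        constructor
        · rintro (h | ⟨h1, h2, h3⟩)
          · exact Or.inl h
          · exact Or.inr ⟨Or.inr h1, h2, h3⟩
        · rintro (h | ⟨(rfl | h1), h2, h3⟩)
          · exact Or.inl h
          · exact absurd h2 hx
          · exact Or.inr ⟨h1, h2, h3⟩
-- membership in the two sets after B's full pass over node_results
theorem pv_outer_mem (nrs : List (String × String)) (fixture_ids : List String) (acc : PySem.Set String × PySem.Set String) (fid : String) :
    (fid ∈ (nrs.foldl (fun acc pr =>
        fixture_ids.foldl (fun acc2 f =>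
          if PySem.Str.isIn ("[" ++ f ++ "]") pr.1 then
            (PySem.Set.add acc2.1 f,
             if pr.2 == "failed" then PySem.Set.add acc2.2 f else acc2.2)
          else acc2) acc) acc).1
      ↔ fid ∈ acc.1 ∨ (fid ∈ fixture_ids ∧ ∃ pr ∈ nrs, PySem.Str.isIn ("[" ++ fid ++ "]") pr.1 = true)) ∧
    (fid ∈ (nrs.foldl (fun acc pr =>
        fixture_ids.foldl (fun acc2 f =>
          if PySem.Str.isIn ("[" ++ f ++ "]") pr.1 then
            (PySem.Set.add acc2.1 f,
             if pr.2 == "failed" then PySem.Set.add acc2.2 f else acc2.2)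
          else acc2) acc) acc).2
      ↔ fid ∈ acc.2 ∨ (fid ∈ fixture_ids ∧ ∃ pr ∈ nrs, PySem.Str.isIn ("[" ++ fid ++ "]") pr.1 = true ∧ pr.2 = "failed")) := by
  induction nrs generalizing acc with
  | nil => simp
  | cons x xs ih =>
    simp only [List.foldl_cons, List.mem_cons]
    constructor
    · rw [(ih _).1, (pv_inner_mem fixture_ids x acc fid).1]
      constructor
      · rintro ((h | ⟨h1, h2⟩) | ⟨h1, pr, hpr, h2⟩)
        · exact Or.inl h
        · exact Or.inr ⟨h1, x, Or.inl rfl, h2⟩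
        · exact Or.inr ⟨h1, pr, Or.inr hpr, h2⟩
      · rintro (h | ⟨h1, pr, (rfl | hpr), h2⟩)
        · exact Or.inl (Or.inl h)
        · exact Or.inl (Or.inr ⟨h1, h2⟩)
        · exact Or.inr ⟨h1, pr, hpr, h2⟩
    · rw [(ih _).2, (pv_inner_mem fixture_ids x acc fid).2]
      constructor
      · rintro ((h | ⟨h1, h2, h3⟩) | ⟨h1, pr, hpr, h2, h3⟩)
        · exact Or.inl h
        · exact Or.inr ⟨h1, x, Or.inl rfl, h2, h3⟩
        · exact Or.inr ⟨h1, pr, Or.inr hpr, h2, h3⟩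
      · rintro (h | ⟨h1, pr, (rfl | hpr), h2, h3⟩)
        · exact Or.inl (Or.inl h)
        · exact Or.inl (Or.inr ⟨h1, h2, h3⟩)
        · exact Or.inr ⟨h1, pr, hpr, h2, h3⟩

theorem pv_set_contains {s : PySem.Set String} {x : String} : PySem.Set.contains s x = true ↔ x ∈ s := by
  simp [PySem.Set.contains]

-- ===== VERDICT (by name: the statement is the Claim_ definition above) =====
theorem fixture_pass_fail_from_results_py_spec : Claim_equal_fixture_pass_fail_from_results_py := by
  intro fixture_ids node_results _
  show fixture_pass_fail_from_results_py fixture_ids node_results = fixture_pass_fail_from_results_py_alt fixture_ids node_results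
  unfold fixture_pass_fail_from_results_py fixture_pass_fail_from_results_py_alt
  refine congrArg PySem.Dict.items ?_
  apply PySem.List.foldl_congr_mem
  intro results fid hfid
  have hseen : fid ∈ (node_results.foldl (fun acc pr =>
        fixture_ids.foldl (fun acc2 f =>
          if PySem.Str.isIn ("[" ++ f ++ "]") pr.1 then
            (PySem.Set.add acc2.1 f,
             if pr.2 == "failed" then PySem.Set.add acc2.2 f else acc2.2)
          else acc2) acc) (PySem.Set.empty, PySem.Set.empty)).1
      ↔ (fid ∈ fixture_ids ∧ ∃ pr ∈ node_results, PySem.Str.isIn ("[" ++ fid ++ "]") pr.1 = true) := by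
    rw [(pv_outer_mem node_results fixture_ids (PySem.Set.empty, PySem.Set.empty) fid).1]
    simp [PySem.Set.empty]
  have hfail : fid ∈ (node_results.foldl (fun acc pr =>
        fixture_ids.foldl (fun acc2 f =>
          if PySem.Str.isIn ("[" ++ f ++ "]") pr.1 then
            (PySem.Set.add acc2.1 f,
             if pr.2 == "failed" then PySem.Set.add acc2.2 f else acc2.2)
          else acc2) acc) (PySem.Set.empty, PySem.Set.empty)).2
      ↔ (fid ∈ fixture_ids ∧ ∃ pr ∈ node_results, PySem.Str.isIn ("[" ++ fid ++ "]") pr.1 = true ∧ pr.2 = "failed") := by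
    rw [(pv_outer_mem node_results fixture_ids (PySem.Set.empty, PySem.Set.empty) fid).2]
    simp [PySem.Set.empty]
  dsimp only
  by_cases hF : ∃ pr ∈ node_results, PySem.Str.isIn ("[" ++ fid ++ "]") pr.1 = true ∧ pr.2 = "failed"
  · have hS : ∃ pr ∈ node_results, PySem.Str.isIn ("[" ++ fid ++ "]") pr.1 = true := by
      obtain ⟨pr, h1, h2, _⟩ := hF
      exact ⟨pr, h1, h2⟩
    rw [if_pos (pv_set_contains.2 (hfail.2 ⟨hfid, hF⟩))]
    rw [if_neg (by
      simp only [List.isEmpty_iff, List.map_eq_nil_iff, List.filter_eq_nil_iff]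
      obtain ⟨pr, h1, h2⟩ := hS
      intro h
      have hh := h pr h1
      simp at h2
      simp [h2] at hh)]
    rw [if_pos (by
      simp only [List.contains_eq_mem, List.mem_map, List.mem_filter, decide_eq_true_eq]
      obtain ⟨pr, h1, h2, h3⟩ := hF
      exact ⟨pr, ⟨h1, h2⟩, h3⟩)]
  · rw [if_neg (fun hc => hF ((hfail.1 (pv_set_contains.1 hc)).2))]
    by_cases hS : ∃ pr ∈ node_results, PySem.Str.isIn ("[" ++ fid ++ "]") pr.1 = true
    · rw [if_pos (pv_set_contains.2 (hseen.2 ⟨hfid, hS⟩))]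
      rw [if_neg (by
        simp only [List.isEmpty_iff, List.map_eq_nil_iff, List.filter_eq_nil_iff]
        obtain ⟨pr, h1, h2⟩ := hS
        intro h
        have hh := h pr h1
        simp at h2
        simp [h2] at hh)]
      rw [if_neg (by
        simp only [List.contains_eq_mem, List.mem_map, List.mem_filter, decide_eq_true_eq]
        rintro ⟨pr, ⟨h1, h2⟩, h3⟩
        exact hF ⟨pr, h1, h2, h3⟩)]
    · rw [if_neg (fun hc => hS ((hseen.1 (pv_set_contains.1 hc)).2))]
      rw [if_pos (by
        simp only [List.isEmpty_iff, List.map_eq_nil_iff, List.filter_eq_nil_iff]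
        intro pr h1 h2
        exact hS ⟨pr, h1, of_decide_eq_true (by simpa using h2)⟩)]
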